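-- pv_equiv track=rewrite | github.com/kEzorka/mipt_homeworks_2026 | Part_3_Types_Conditions_Loops_Functions/hw3.py | extract_digit_and_number_from_str
-- ===== SOURCE A (Python) =====
-- def extract_digit_and_number_from_str(input_str: str) -> tuple[int, str]:
--     index: int = 0
--     digit: int = 0
--     while index < len(input_str) and input_str[index] in ("+", "-"):
--         if input_str[index] == "-":
--             digit = (digit + 1) % 2
--
--         index += 1
--
--     return digit, input_str[index:]
-- ===== SOURCE B (Python) =====
-- def extract_digit_and_number_from_str(input_str: str) -> tuple[int, str]:
--     rest = input_str.lstrip('+-')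
--     prefix = input_str[:len(input_str) - len(rest)]
--     return prefix.count('-') % 2, rest
-- ===== Notes on version B (the rewrite author's own statement) =====
-- stated objective: idiomatic
-- what changed: Replaces the explicit index-tracking while loop with inline parity updates by a lstrip('+-') to find the remainder, slicing off the sign prefix, and counting '-' characters with a single count()%2.
import Mathlib
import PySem

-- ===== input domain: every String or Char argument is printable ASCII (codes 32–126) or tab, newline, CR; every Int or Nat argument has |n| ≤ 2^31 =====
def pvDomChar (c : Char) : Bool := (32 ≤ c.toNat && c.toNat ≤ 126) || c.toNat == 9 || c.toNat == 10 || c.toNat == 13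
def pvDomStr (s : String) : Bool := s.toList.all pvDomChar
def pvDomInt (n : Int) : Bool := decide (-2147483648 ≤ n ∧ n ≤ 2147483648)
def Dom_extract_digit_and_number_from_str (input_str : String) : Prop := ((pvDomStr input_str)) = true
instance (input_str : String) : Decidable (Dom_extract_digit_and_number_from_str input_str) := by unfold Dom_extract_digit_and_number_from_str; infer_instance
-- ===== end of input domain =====

-- B replaces A's index-tracking while loop (inline parity update) by lstrip('+-'),
-- a prefix slice and count('-') % 2; objective: idiomatic, not faster.

-- ===== PORT A =====
-- the while loop: state = (digit, remaining characters); same branch order as A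
def pvLoopA : List Char → Int → Int × List Char
  | [], digit => (digit, [])
  | c :: cs, digit =>
    if c = '+' ∨ c = '-' then
      pvLoopA cs (if c = '-' then (digit + 1) % 2 else digit)
    else (digit, c :: cs)

def extract_digit_and_number_from_str (input_str : String) : Int × String :=
  let r := pvLoopA input_str.toList 0
  (r.1, String.ofList r.2)

-- ===== PORT B =====
-- lstrip('+-') = dropWhile over the char list (exact: lstrip strips chars in the set);
-- prefix = input_str[:len - len rest]; count('-') % 2 via List.count and Int.emod
def extract_digit_and_number_from_str_alt (input_str : String) : Int × String :=
  let l := input_str.toList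
  let rest := l.dropWhile (fun c => c == '+' || c == '-')
  let sgn := l.take (l.length - rest.length)
  (((sgn.count '-' : Int)) % 2, String.ofList rest)

-- ===== PRECONDITION & SPEC =====
def Spec_extract_digit_and_number_from_str (input_str : String) (out : Int × String) : Prop := out = extract_digit_and_number_from_str_alt input_str
instance (input_str : String) (out : Int × String) : Decidable (Spec_extract_digit_and_number_from_str input_str out) := by unfold Spec_extract_digit_and_number_from_str; infer_instance

-- ===== CLAIM (what is proved, stated in full; the proofs are below) =====
def Claim_equal_extract_digit_and_number_from_str : Prop := ∀ (input_str : String), Dom_extract_digit_and_number_from_str input_str → Spec_extract_digit_and_number_from_str input_str (extract_digit_and_number_from_str input_str)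

-- ===== LEMMAS AND PROOFS =====
theorem pvLoopA_eq (l : List Char) (d : Int) (hd : d = 0 ∨ d = 1) :
    pvLoopA l d = ((d + ((l.takeWhile (fun c => c == '+' || c == '-')).count '-' : Int)) % 2,
      l.dropWhile (fun c => c == '+' || c == '-')) := by
  induction l generalizing d with
  | nil =>
    simp [pvLoopA]
    omega
  | cons c cs ih =>
    by_cases hc : c = '+' ∨ c = '-'
    · have hb : (c == '+' || c == '-') = true := by
        rcases hc with h | h <;> simp [h]
      by_cases hm : c = '-'
      · rw [pvLoopA, if_pos hc, if_pos hm,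
          ih ((d + 1) % 2) (by omega)]
        simp [hm]
        omega
      · rw [pvLoopA, if_pos hc, if_neg hm, ih d hd]
        simp [hb, hm]
    · have hb : (c == '+' || c == '-') = false := by
        simp only [Bool.or_eq_false_iff, beq_eq_false_iff_ne]
        exact ⟨fun h => hc (Or.inl h), fun h => hc (Or.inr h)⟩
      rw [pvLoopA, if_neg hc]
      simp [hb]
      omega

theorem pvTake_eq_takeWhile (l : List Char) (p : Char → Bool) :
    l.take (l.length - (l.dropWhile p).length) = l.takeWhile p := by
  have h : List.takeWhile p l ++ List.dropWhile p l = l := List.takeWhile_append_dropWhile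
  have hlen := congrArg List.length h
  rw [List.length_append] at hlen
  rw [show l.length - (l.dropWhile p).length = (l.takeWhile p).length by omega]
  nth_rewrite 2 [← h]
  rw [List.take_left]

-- ===== VERDICT (by name: the statement is the Claim_ definition above) =====
theorem extract_digit_and_number_from_str_spec : Claim_equal_extract_digit_and_number_from_str := by
  intro s _
  unfold Spec_extract_digit_and_number_from_str extract_digit_and_number_from_str
    extract_digit_and_number_from_str_alt
  simp only [pvLoopA_eq _ 0 (Or.inl rfl), pvTake_eq_takeWhile]
  simp
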